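-- pv_equiv track=rewrite | github.com/Lgn-rsp/Dodo | tools/make_book_123456.py | parse_workdir_execstart
-- ===== SOURCE A (Python) =====
-- def parse_workdir_execstart(show_text: str):
--   wd=None
--   ex=None
--   for ln in show_text.splitlines():
--     if ln.startswith("WorkingDirectory="):
--       wd=ln.split("=",1)[1].strip() or None
--     if ln.startswith("ExecStart="):
--       ex=ln.split("=",1)[1].strip() or None
--   return wd, ex
-- ===== SOURCE B (Python) =====
-- def parse_workdir_execstart(show_text: str):
--     kv = {}
--     for ln in show_text.splitlines():
--         if "=" in ln:
--             k, v = ln.split("=", 1)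
--             kv[k] = v
--
--     def pick(key):
--         v = kv.get(key)
--         if v is None:
--             return None
--         return v.strip() or None
--
--     return pick("WorkingDirectory"), pick("ExecStart")
-- ===== Notes on version B (the rewrite author's own statement) =====
-- stated objective: idiomatic
-- what changed: B builds one key->value dict from all 'k=v' lines (last wins) and then looks up 'WorkingDirectory' and 'ExecStart' with strip-or-None, instead of A's two inline prefix-guarded accumulators updated inside the loop.
import Mathlib
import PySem

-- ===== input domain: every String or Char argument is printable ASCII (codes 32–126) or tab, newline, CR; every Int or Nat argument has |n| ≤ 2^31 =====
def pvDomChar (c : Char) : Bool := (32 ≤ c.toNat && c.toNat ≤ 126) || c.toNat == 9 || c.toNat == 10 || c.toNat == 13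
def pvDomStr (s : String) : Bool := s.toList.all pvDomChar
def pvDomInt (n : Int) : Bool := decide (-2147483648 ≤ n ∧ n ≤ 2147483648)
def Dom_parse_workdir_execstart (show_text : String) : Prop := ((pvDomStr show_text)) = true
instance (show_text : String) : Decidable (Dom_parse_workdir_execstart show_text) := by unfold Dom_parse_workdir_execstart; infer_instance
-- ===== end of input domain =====

-- B replaces A's two inline prefix-guarded accumulators by one key->value dict built from all 'k=v'
-- lines (last wins) followed by two lookups with strip-or-None (objective: more idiomatic).

-- ===== PORT A =====
-- 'x.strip() or None' (both Pythons use this on the value)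
def pvStripOrNone (s : String) : Option String :=
  let t := PySem.Str.strip s
  if t = "" then none else some t

-- 'ln.split("=",1)[1]': sep is nonempty so splitMax? is 'some'; under the startswith guard the
-- index 1 always exists, so the '.getD' defaults are never reached (Python raises nowhere here).
def pvA_val (ln : String) : String :=
  (PySem.List.pyGet? ((PySem.Str.splitMax? ln "=" 1).getD []) 1).getD ""

def pvA_step (st : Option String × Option String) (ln : String) : Option String × Option String :=
  let st1 : Option String × Option String :=
    if PySem.Str.startswith ln "WorkingDirectory=" then (pvStripOrNone (pvA_val ln), st.2) else st
  if PySem.Str.startswith ln "ExecStart=" then (st1.1, pvStripOrNone (pvA_val ln)) else st1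

def parse_workdir_execstart (show_text : String) : Option String × Option String :=
  (PySem.Str.splitlines show_text).foldl pvA_step (none, none)

-- ===== PORT B =====
-- dict-building loop body: if "=" in ln: k, v = ln.split("=", 1); kv[k] = v
def pvB_step (d : PySem.Dict String String) (ln : String) : PySem.Dict String String :=
  if PySem.Str.isIn "=" ln then
    let parts := (PySem.Str.splitMax? ln "=" 1).getD []
    d.insert ((PySem.List.pyGet? parts 0).getD "") ((PySem.List.pyGet? parts 1).getD "")
  else d

-- pick(key): v = kv.get(key); None if v is None else v.strip() or None
def pvPick (d : PySem.Dict String String) (key : String) : Option String :=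
  match d.get? key with
  | none => none
  | some v => pvStripOrNone v

def parse_workdir_execstart_alt (show_text : String) : Option String × Option String :=
  let kv := (PySem.Str.splitlines show_text).foldl pvB_step PySem.Dict.empty
  (pvPick kv "WorkingDirectory", pvPick kv "ExecStart")

-- ===== PRECONDITION & SPEC =====
def Spec_parse_workdir_execstart (show_text : String) (out : Option String × Option String) : Prop := out = parse_workdir_execstart_alt show_text
instance (show_text : String) (out : Option String × Option String) : Decidable (Spec_parse_workdir_execstart show_text out) := by unfold Spec_parse_workdir_execstart; infer_instance

-- ===== CLAIM (what is proved, stated in full; the proofs are below) =====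
def Claim_equal_parse_workdir_execstart : Prop := ∀ (show_text : String), Dom_parse_workdir_execstart show_text → Spec_parse_workdir_execstart show_text (parse_workdir_execstart show_text)

-- ===== LEMMAS AND PROOFS =====

-- [c] is an infix of l iff c is a member
theorem pv_singleton_infix {c : Char} {l : List Char} : [c] <:+: l ↔ c ∈ l := by
  constructor
  · rintro ⟨s, t, rfl⟩; simp
  · intro h
    obtain ⟨s, t, rfl⟩ := List.append_of_mem h
    exact ⟨s, t, by simp⟩

-- splitOnMax.go with m = 0 just flushes
theorem pv_go_zero (fuel : Nat) (l cur : List Char) (acc : List (List Char)) :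
    PySem.Chars.splitOnMax.go ['='] fuel 0 l cur acc = ((cur.reverse ++ l) :: acc).reverse := by
  cases fuel with
  | zero => rfl
  | succ n => cases l <;> simp [PySem.Chars.splitOnMax.go]

theorem pv_go_found (a : List Char) : ∀ (fuel : Nat) (b cur : List Char) (acc : List (List Char)),
    '=' ∉ a → a.length < fuel →
    PySem.Chars.splitOnMax.go ['='] fuel 1 (a ++ '=' :: b) cur acc
      = acc.reverse ++ [cur.reverse ++ a, b] := by
  induction a with
  | nil =>
    intro fuel b cur acc _ hf
    cases fuel with
    | zero => omega
    | succ n =>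
      simp only [List.nil_append, PySem.Chars.splitOnMax.go]
      rw [if_neg (by omega), if_pos (by simp [List.isPrefixOf])]
      simp [pv_go_zero]
  | cons c a ih =>
    intro fuel b cur acc hmem hf
    cases fuel with
    | zero => simp at hf
    | succ n =>
      have hc : c ≠ '=' := by intro h; exact hmem (by simp [h])
      simp only [List.cons_append, PySem.Chars.splitOnMax.go]
      rw [if_neg (by omega), if_neg (by simp [List.isPrefixOf, Ne.symm hc])]
      rw [ih n b (c :: cur) acc (fun h => hmem (by simp [h])) (by simp at hf; omega)]
      simp

theorem pv_splitOnMax_found {a b : List Char} (h : '=' ∉ a) :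
    PySem.Chars.splitOnMax (a ++ '=' :: b) ['='] 1 = [a, b] := by
  unfold PySem.Chars.splitOnMax
  rw [if_neg (by omega)]
  simp only [Int.toNat_one]
  rw [pv_go_found a _ b [] [] h (by simp)]
  simp

-- prefix key ++ '=' of a ++ '=' :: b with '='-free key and a means key = a
theorem pv_prefix_eq (k : List Char) : ∀ (a u b : List Char), '=' ∉ k → '=' ∉ a →
    ((k ++ '=' :: u) <+: (a ++ '=' :: b)) → k = a := by
  induction k with
  | nil =>
    intro a u b _ ha hp
    cases a with
    | nil => rfl
    | cons c a =>
      obtain ⟨t, ht⟩ := hp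
      simp at ht
      exact absurd ht.1.symm (fun h => ha (by simp [h]))
  | cons c k ih =>
    intro a u b hk ha hp
    cases a with
    | nil =>
      obtain ⟨t, ht⟩ := hp
      simp at ht
      exact absurd ht.1 (fun h => hk (by simp [h]))
    | cons c' a =>
      obtain ⟨t, ht⟩ := hp
      simp at ht
      obtain ⟨rfl, ht⟩ := ht
      have := ih a u b (fun h => hk (by simp [h])) (fun h => ha (by simp [h])) ⟨t, by simpa using ht⟩
      rw [this]

-- characterize A's startswith guard by the split key, for a line containing '='
theorem pv_guard_iff {a b k : List Char} (ha : '=' ∉ a) (hk : '=' ∉ k) :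
    PySem.Chars.startswith (a ++ '=' :: b) (k ++ ['=']) = true ↔ k = a := by
  rw [PySem.Chars.startswith_iff]
  constructor
  · intro hp
    obtain ⟨t, ht⟩ := hp
    have : (k ++ '=' :: t) <+: (a ++ '=' :: b) := ⟨[], by simpa using ht⟩
    exact pv_prefix_eq k a t b hk ha this
  · rintro rfl
    exact ⟨b, by simp⟩

-- if the line has no '=', A's guards are false
theorem pv_guard_false {cs k : List Char} (h : '=' ∉ cs) (hk : '=' ∈ k) :
    PySem.Chars.startswith cs k = false := by
  rw [Bool.eq_false_iff]
  intro hb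
  rw [PySem.Chars.startswith_iff] at hb
  exact h (hb.subset hk)

-- value of A's guard on a line decomposed at its first '=' (key itself '='-free)
theorem pv_key_step (k : String) (a b : List Char) (ha : '=' ∉ a) (hk : '=' ∉ k.toList) :
    PySem.Chars.startswith (a ++ '=' :: b) (k.toList ++ ['=']) = decide (a = k.toList) := by
  by_cases he : a = k.toList
  · subst he
    rw [decide_eq_true rfl]
    exact (pv_guard_iff ha hk).mpr rfl
  · rw [decide_eq_false he, Bool.eq_false_iff]
    intro hb
    exact he ((pv_guard_iff ha hk).mp hb).symm

-- String equality vs char-list equality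
theorem pv_eq_iff (k : String) (a : List Char) : (k = String.ofList a) ↔ (a = k.toList) := by
  constructor
  · rintro rfl; exact String.toList_ofList.symm
  · rintro rfl; exact String.ofList_toList.symm

-- the per-line step correspondence
theorem pv_step (d : PySem.Dict String String) (ln : String) :
    pvA_step (pvPick d "WorkingDirectory", pvPick d "ExecStart") ln
      = (pvPick (pvB_step d ln) "WorkingDirectory", pvPick (pvB_step d ln) "ExecStart") := by
  by_cases hmem : '=' ∈ ln.toList
  · -- decompose the line at the first '='
    obtain ⟨a, b, hcs, ha⟩ : ∃ a b, ln.toList = a ++ '=' :: b ∧ '=' ∉ a := by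
      refine ⟨ln.toList.takeWhile (· ≠ '='), (ln.toList.dropWhile (· ≠ '=')).tail, ?_, ?_⟩
      · have hne : ln.toList.dropWhile (· ≠ '=') ≠ [] := by
          intro h
          have := List.dropWhile_eq_nil_iff.mp h
          simpa using this '=' hmem
        have hhead : (ln.toList.dropWhile (· ≠ '=')).head hne = '=' := by
          have := List.head_dropWhile_not (p := (· ≠ '=')) hne
          simpa using this
        conv_lhs => rw [← List.takeWhile_append_dropWhile (p := (· ≠ '=')) (l := ln.toList)]
        congr 1
        conv_lhs => rw [← List.cons_head_tail hne]
        rw [hhead]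
      · intro h
        have := List.mem_takeWhile_imp h
        simp at this
    have hsplit : PySem.Str.splitMax? ln "=" 1 = some [String.ofList a, String.ofList b] := by
      unfold PySem.Str.splitMax? PySem.Chars.splitMax?
      have hsep : ("=" : String).toList = ['='] := by decide
      rw [hcs, hsep]
      simp [pv_splitOnMax_found ha]
    have hisin : PySem.Str.isIn "=" ln = true := by
      simp only [PySem.Str.isIn_eq]
      have hsep : ("=" : String).toList = ['='] := by decide
      rw [hsep, PySem.Chars.isIn_iff_infix]
      exact pv_singleton_infix.mpr (by simp [hcs])
    have hval : pvA_val ln = String.ofList b := by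
      unfold pvA_val
      rw [hsplit]
      simp [PySem.List.pyGet?, PySem.List.pyIdx?]
    have hW : PySem.Str.startswith ln "WorkingDirectory=" = decide (a = ("WorkingDirectory" : String).toList) := by
      simp only [PySem.Str.startswith_eq]
      have h1 : ("WorkingDirectory=" : String).toList = ("WorkingDirectory" : String).toList ++ ['='] := by decide
      rw [hcs, h1]
      exact pv_key_step _ a b ha (by decide)
    have hE : PySem.Str.startswith ln "ExecStart=" = decide (a = ("ExecStart" : String).toList) := by
      simp only [PySem.Str.startswith_eq]
      have h1 : ("ExecStart=" : String).toList = ("ExecStart" : String).toList ++ ['='] := by decide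
      rw [hcs, h1]
      exact pv_key_step _ a b ha (by decide)
    have hB : pvB_step d ln = d.insert (String.ofList a) (String.ofList b) := by
      unfold pvB_step
      rw [hisin, hsplit]
      simp [PySem.List.pyGet?, PySem.List.pyIdx?]
    unfold pvA_step
    rw [hW, hE, hval, hB]
    unfold pvPick
    rw [PySem.Dict.get?_insert, PySem.Dict.get?_insert]
    by_cases h1 : a = ("WorkingDirectory" : String).toList <;>
      by_cases h2 : a = ("ExecStart" : String).toList <;>
      simp only [h1, h2, decide_true, decide_false, if_true, if_false, pv_eq_iff] <;>
      simp_all [pv_eq_iff]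
  · -- no '=' in the line: nothing changes on either side
    have hB : pvB_step d ln = d := by
      unfold pvB_step
      have : PySem.Str.isIn "=" ln = false := by
        rw [Bool.eq_false_iff]
        intro hb
        simp only [PySem.Str.isIn_eq] at hb
        have hsep : ("=" : String).toList = ['='] := by decide
        rw [hsep, PySem.Chars.isIn_iff_infix] at hb
        exact hmem (pv_singleton_infix.mp hb)
      rw [this]
      simp
    have hW : PySem.Str.startswith ln "WorkingDirectory=" = false := by
      simp only [PySem.Str.startswith_eq]
      exact pv_guard_false hmem (by decide)
    have hE : PySem.Str.startswith ln "ExecStart=" = false := by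
      simp only [PySem.Str.startswith_eq]
      exact pv_guard_false hmem (by decide)
    unfold pvA_step
    rw [hW, hE, hB]
    simp

-- the fold-level invariant
theorem pv_fold (L : List String) : ∀ (d : PySem.Dict String String),
    L.foldl pvA_step (pvPick d "WorkingDirectory", pvPick d "ExecStart")
      = (pvPick (L.foldl pvB_step d) "WorkingDirectory", pvPick (L.foldl pvB_step d) "ExecStart") := by
  induction L with
  | nil => intro d; rfl
  | cons ln L ih =>
    intro d
    simp only [List.foldl_cons]
    rw [pv_step d ln]
    exact ih (pvB_step d ln)

-- ===== VERDICT (by name: the statement is the Claim_ definition above) =====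
theorem parse_workdir_execstart_spec : Claim_equal_parse_workdir_execstart := by
  intro s _
  unfold Spec_parse_workdir_execstart parse_workdir_execstart parse_workdir_execstart_alt
  have h0 : (none, none) = (pvPick PySem.Dict.empty "WorkingDirectory", pvPick PySem.Dict.empty "ExecStart") := by
    simp [pvPick, PySem.Dict.get?_empty]
  rw [h0, pv_fold]
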